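-- pv_equiv track=rewrite | github.com/ikokkari/PythonProblems | labs109.py | __cookie
-- ===== SOURCE A (Python) =====
-- from itertools import combinations, chain, islice, count, product, zip_longest
--
-- def __cookie(piles, dl, bl):
--     if dl < 1:
--         return None
--     n = len(piles)
--     if n == 1:
--         return [piles[0]]
--     decor = [((i + 1) * e, e) for (i, e) in enumerate(reversed(piles))]
--     for (drop, e) in islice(sorted(decor, reverse=True), bl):
--         new_piles = [c - (e if e <= c else 0) for c in piles]
--         new_piles = sorted(set([c for c in new_piles if c > 0]))
--         rest = __cookie(new_piles, dl - 1, bl)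
--         if rest is not None:
--             return [e] + rest
--     return None
-- ===== SOURCE B (Python) =====
-- def _moves(p, bl):
--     decor = [((i + 1) * e, e) for (i, e) in enumerate(reversed(p))]
--     return sorted(decor, reverse=True)[:bl]
--
-- def _child(p, e):
--     new_piles = [c - (e if e <= c else 0) for c in p]
--     return sorted(set(c for c in new_piles if c > 0))
--
-- def __cookie(piles, dl, bl):
--     # explicit stack-based DFS instead of recursion; same candidate order
--     stack = [(piles, dl, [])]
--     while stack:
--         p, d, path = stack.pop()
--         if d < 1:
--             continue
--         if len(p) == 1:
--             return path + [p[0]]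
--         for (_drop, e) in reversed(_moves(p, bl)):
--             stack.append((_child(p, e), d - 1, path + [e]))
--     return None
-- ===== Notes on version B (the rewrite author's own statement) =====
-- stated objective: alternative
-- what changed: The depth-limited recursive backtracking is replaced by an explicit stack-based DFS loop carrying (piles, remaining depth, path) frames, with children pushed in reverse so they are explored in the same descending-score order; the candidate/child computation is kept identical.
import Mathlib
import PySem

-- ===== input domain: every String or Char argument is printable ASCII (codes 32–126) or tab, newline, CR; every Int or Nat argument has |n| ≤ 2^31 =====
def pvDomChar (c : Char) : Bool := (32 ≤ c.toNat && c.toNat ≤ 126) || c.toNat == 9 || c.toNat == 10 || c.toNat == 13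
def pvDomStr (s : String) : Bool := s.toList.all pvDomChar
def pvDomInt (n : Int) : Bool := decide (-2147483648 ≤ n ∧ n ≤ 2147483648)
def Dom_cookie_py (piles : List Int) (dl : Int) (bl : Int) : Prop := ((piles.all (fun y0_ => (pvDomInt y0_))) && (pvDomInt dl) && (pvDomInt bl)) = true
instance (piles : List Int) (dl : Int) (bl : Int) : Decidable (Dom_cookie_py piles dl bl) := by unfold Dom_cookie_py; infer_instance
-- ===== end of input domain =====

-- B replaces A's depth-first recursion by an explicit stack-based DFS loop (same candidate
-- generation and order, same first-found result); objective: alternative decomposition.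

-- ===== PORT A =====
-- shared candidate computation (byte-identical in Source A and Source B):
-- decor = [((i+1)*e, e) for (i, e) in enumerate(reversed(p))]; sorted(decor, reverse=True)
def pvSortedDecor (p : List Int) : List (Int × Int) :=
  PySem.List.sorted2 ((PySem.List.enumerate p.reverse).map (fun ie => ((ie.1 + 1) * ie.2, ie.2)))
    (fun x => x.1) (fun x => x.2) true

-- new_piles = [c - (e if e <= c else 0) for c in p]; sorted(set(c for c in new_piles if c > 0))
def pvChild (p : List Int) (e : Int) : List Int :=
  PySem.List.sorted
    (PySem.Set.ofList ((p.map (fun c => c - (if e ≤ c then e else 0))).filter (fun c => decide (0 < c))))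
    (fun x => x) false

-- port of A: recursion on dl; the for-loop with early return is the short-circuiting foldl
def cookie_py (piles : List Int) (dl : Int) (bl : Int) : Option (List Int) :=
  if _h : dl < 1 then none
  else if piles.length = 1 then some [piles.headD 0]   -- piles[0], in-range since len = 1
  else
    -- islice(sorted(decor, reverse=True), bl): take bl.toNat (bl ≥ 0 under Pre_)
    ((pvSortedDecor piles).take bl.toNat).foldl
      (fun acc de =>
        match acc with
        | some r => some r
        | none =>
          match cookie_py (pvChild piles de.2) (dl - 1) bl with
          | some rest => some (de.2 :: rest)
          | none => none)
      none
termination_by dl.toNat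
decreasing_by omega

-- ===== PORT B =====
-- measure for the stack loop (proof device only; not part of Source B's code)
def pvStackM (st : List (List Int × Int × List Int)) : Nat :=
  (st.map (fun f => (f.1.length + 2) ^ f.2.1.toNat)).sum

theorem pvChild_len_le (p : List Int) (e : Int) : (pvChild p e).length ≤ p.length := by
  unfold pvChild
  calc (PySem.List.sorted (PySem.Set.ofList ((p.map (fun c => c - (if e ≤ c then e else 0))).filter (fun c => decide (0 < c)))) (fun x => x) false).length
      = (PySem.Set.ofList ((p.map (fun c => c - (if e ≤ c then e else 0))).filter (fun c => decide (0 < c)))).length := PySem.List.length_sorted _ _ _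
    _ ≤ ((p.map (fun c => c - (if e ≤ c then e else 0))).filter (fun c => decide (0 < c))).length := PySem.Set.length_ofList_le _
    _ ≤ (p.map (fun c => c - (if e ≤ c then e else 0))).length := List.length_filter_le _ _
    _ = p.length := List.length_map ..

theorem pvSortedDecor_len (p : List Int) : (pvSortedDecor p).length = p.length := by
  unfold pvSortedDecor
  rw [(PySem.List.sorted2_perm _ _ _ _).length_eq, List.length_map, PySem.List.length_enumerate,
    List.length_reverse]

theorem pvStackM_append (l1 l2 : List (List Int × Int × List Int)) :
    pvStackM (l1 ++ l2) = pvStackM l1 + pvStackM l2 := by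
  unfold pvStackM; rw [List.map_append, List.sum_append]

theorem pvStackM_children_lt (p : List Int) (d : Int) (path : List Int) (bl : Int)
    (rest : List (List Int × Int × List Int)) (hd : ¬ d < 1) :
    pvStackM (((PySem.List.slice (pvSortedDecor p) none (some bl)).map
        (fun de => (pvChild p de.2, d - 1, path ++ [de.2]))) ++ rest)
      < pvStackM ((p, d, path) :: rest) := by
  rw [pvStackM_append]
  have hX : 0 < (p.length + 2) ^ (d - 1).toNat := Nat.pow_pos (by omega)
  have hchild : pvStackM ((PySem.List.slice (pvSortedDecor p) none (some bl)).map
      (fun de => (pvChild p de.2, d - 1, path ++ [de.2])))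
      ≤ p.length * (p.length + 2) ^ (d - 1).toNat := by
    unfold pvStackM
    rw [List.map_map]
    have hbound : ∀ x ∈ (PySem.List.slice (pvSortedDecor p) none (some bl)).map
        ((fun f => (f.1.length + 2) ^ f.2.1.toNat) ∘ (fun de => (pvChild p de.2, d - 1, path ++ [de.2]))),
        x ≤ (p.length + 2) ^ (d - 1).toNat := by
      intro x hx
      simp only [List.mem_map, Function.comp] at hx
      obtain ⟨de, _, rfl⟩ := hx
      exact Nat.pow_le_pow_left (by have := pvChild_len_le p de.2; omega) _
    calc ((PySem.List.slice (pvSortedDecor p) none (some bl)).map _).sum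
        ≤ ((PySem.List.slice (pvSortedDecor p) none (some bl)).map _).length * (p.length + 2) ^ (d - 1).toNat :=
          List.sum_le_card_nsmul _ _ hbound
      _ ≤ p.length * (p.length + 2) ^ (d - 1).toNat := by
          apply Nat.mul_le_mul_right
          rw [List.length_map]
          calc (PySem.List.slice (pvSortedDecor p) none (some bl)).length
              ≤ (pvSortedDecor p).length := PySem.List.length_slice_le _ _ _
            _ = p.length := pvSortedDecor_len p
  have hhead : (p.length + 2) ^ d.toNat = (p.length + 2) * (p.length + 2) ^ (d - 1).toNat := by
    have : d.toNat = (d - 1).toNat + 1 := by omega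
    rw [this, pow_succ]; ring
  unfold pvStackM
  simp only [List.map_cons, List.sum_cons]
  have : p.length * (p.length + 2) ^ (d - 1).toNat < (p.length + 2) ^ d.toNat := by
    rw [hhead]; exact (Nat.mul_lt_mul_right hX).mpr (by omega)
  calc pvStackM ((PySem.List.slice (pvSortedDecor p) none (some bl)).map
        (fun de => (pvChild p de.2, d - 1, path ++ [de.2]))) + pvStackM rest
      ≤ p.length * (p.length + 2) ^ (d - 1).toNat + pvStackM rest := by omega
    _ < (p.length + 2) ^ d.toNat + pvStackM rest := by omega
    _ = (p.length + 2) ^ d.toNat + (rest.map (fun f => (f.1.length + 2) ^ f.2.1.toNat)).sum := rfl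

-- the stack loop of Source B: head of the list = top of the stack; Source B pushes the candidate
-- frames in reversed order so they are popped in candidate order — here, prepend them in order
def pvCookieRun (bl : Int) (stack : List (List Int × Int × List Int)) : Option (List Int) :=
  match stack with
  | [] => none
  | (p, d, path) :: rest =>
    if d < 1 then pvCookieRun bl rest
    else if p.length = 1 then some (path ++ [p.headD 0])
    else
      pvCookieRun bl (((PySem.List.slice (pvSortedDecor p) none (some bl)).map
        (fun de => (pvChild p de.2, d - 1, path ++ [de.2]))) ++ rest)
termination_by pvStackM stack
decreasing_by
  · unfold pvStackM; simp only [List.map_cons, List.sum_cons]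
    have : 0 < (p.length + 2) ^ d.toNat := Nat.pow_pos (by omega)
    omega
  · exact pvStackM_children_lt p d path bl rest (by assumption)

def cookie_py_alt (piles : List Int) (dl : Int) (bl : Int) : Option (List Int) :=
  pvCookieRun bl [(piles, dl, [])]

-- ===== PRECONDITION & SPEC =====
-- Pre_ excludes exactly the inputs on which A raises ValueError: islice(…, bl) with a
-- negative bl, reached only when dl ≥ 1 and len(piles) ≠ 1.
def Pre_cookie_py (piles : List Int) (dl : Int) (bl : Int) : Prop :=
  0 ≤ bl ∨ dl < 1 ∨ piles.length = 1
instance (piles : List Int) (dl : Int) (bl : Int) : Decidable (Pre_cookie_py piles dl bl) := by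
  unfold Pre_cookie_py; infer_instance
def pvWitness_cookie_py : List Int × Int × Int := ([3, 1, 2], 4, 2)

def Spec_cookie_py (piles : List Int) (dl : Int) (bl : Int) (out : Option (List Int)) : Prop := out = cookie_py_alt piles dl bl
instance (piles : List Int) (dl : Int) (bl : Int) (out : Option (List Int)) : Decidable (Spec_cookie_py piles dl bl out) := by unfold Spec_cookie_py; infer_instance

-- ===== CLAIM (what is proved, stated in full; the proofs are below) =====
def Claim_equal_cookie_py : Prop := ∀ (piles : List Int) (dl : Int) (bl : Int), Dom_cookie_py piles dl bl → Pre_cookie_py piles dl bl → Spec_cookie_py piles dl bl (cookie_py piles dl bl)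

-- ===== LEMMAS AND PROOFS =====

-- the loop body's fold short-circuits once it holds a result
theorem pv_foldl_some (l : List (Int × Int)) (g : Int × Int → Option (List Int)) (r : List Int) :
    l.foldl (fun acc de =>
      match acc with
      | some r => some r
      | none =>
        match g de with
        | some rest => some (de.2 :: rest)
        | none => none) (some r) = some r := by
  induction l with
  | nil => rfl
  | cons x xs ih => simpa using ih

-- key correspondence: popping one frame behaves like the recursive call on that frame
theorem pv_run_cons (bl : Int) (hbl : 0 ≤ bl) :
    ∀ (n : Nat) (p : List Int) (d : Int) (path : List Int)
      (rest : List (List Int × Int × List Int)), d.toNat ≤ n →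
    pvCookieRun bl ((p, d, path) :: rest) =
      (match cookie_py p d bl with
       | some r => some (path ++ r)
       | none => pvCookieRun bl rest) := by
  intro n
  induction n with
  | zero =>
    intro p d path rest hle
    have hd : d < 1 := by omega
    rw [pvCookieRun, cookie_py]
    simp [hd]
  | succ n ih =>
    intro p d path rest hle
    by_cases hd : d < 1
    · rw [pvCookieRun, cookie_py]; simp [hd]
    · by_cases h1 : p.length = 1
      · rw [pvCookieRun, cookie_py]; simp [hd, h1]
      · rw [pvCookieRun, cookie_py]
        simp only [hd, h1, if_false]
        rw [PySem.List.slice_to _ hbl]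
        -- inner induction over the candidate list, generalizing the rest of the stack
        have inner : ∀ (cs : List (Int × Int)) (rest : List (List Int × Int × List Int)),
            pvCookieRun bl ((cs.map (fun de => (pvChild p de.2, d - 1, path ++ [de.2]))) ++ rest) =
              (match cs.foldl (fun acc de =>
                  match acc with
                  | some r => some r
                  | none =>
                    match cookie_py (pvChild p de.2) (d - 1) bl with
                    | some rest => some (de.2 :: rest)
                    | none => none) none with
               | some r => some (path ++ r)
               | none => pvCookieRun bl rest) := by
          intro cs
          induction cs with
          | nil => intro rest; simp
          | cons de cs ihc =>
            intro rest
            simp only [List.map_cons, List.cons_append, List.foldl_cons]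
            rw [ih (pvChild p de.2) (d - 1) (path ++ [de.2]) _ (by omega)]
            cases hg : cookie_py (pvChild p de.2) (d - 1) bl with
            | none => simpa [hg] using ihc rest
            | some r =>
              simp only [pv_foldl_some cs (fun de => cookie_py (pvChild p de.2) (d - 1) bl) (de.2 :: r)]
              simp
        exact inner ((pvSortedDecor p).take bl.toNat) rest

-- ===== VERDICT (by name: the statement is the Claim_ definition above) =====
theorem cookie_py_spec : Claim_equal_cookie_py := by
  intro piles dl bl _ hpre
  unfold Spec_cookie_py cookie_py_alt
  rcases hpre with hbl | hdl | h1
  · rw [pv_run_cons bl hbl dl.toNat piles dl [] [] (le_refl _)]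
    cases h : cookie_py piles dl bl with
    | none => simp [pvCookieRun]
    | some r => simp
  · rw [pvCookieRun, cookie_py]; simp [hdl, pvCookieRun]
  · by_cases hdl : dl < 1
    · rw [pvCookieRun, cookie_py]; simp [hdl, pvCookieRun]
    · rw [pvCookieRun, cookie_py]; simp [hdl, h1]
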